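-- pv_equiv track=rewrite | github.com/Tranchande/bttuan_2_3 | 2.12.py | findtruepair
-- ===== SOURCE A (Python) =====
-- def findtruepair(A:list,k):
--     A.sort()
--     B = []
--     B.extend(A)
--     trai, phai = 0, len(A) - 1
--     while trai < phai:
--         sum = A[trai] + A[phai]
--         if sum == k:
--             B.remove(A[trai])
--             B.remove(A[phai])
--             trai += 1
--             phai -= 1
--         elif sum < k:
--             trai += 1
--         else:
--             phai -= 1
--     return B == []
-- ===== SOURCE B (Python) =====
-- def findtruepair(A: list, k):
--     # Different algorithm: instead of a two-pointer scan with list removals,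
--     # count multiplicities once and check that the multiset pairs up exactly:
--     # every value v must appear as often as its complement k - v, and the
--     # self-complementary value k/2 must appear an even number of times.
--     A.sort()  # kept only to preserve A's in-place mutation; the result does not use the order
--     cnt = {}
--     for x in A:
--         cnt[x] = cnt.get(x, 0) + 1
--     for v, c in cnt.items():
--         if v + v == k:
--             if c % 2 != 0:
--                 return False
--         elif cnt.get(k - v, 0) != c:
--             return False
--     return True
-- ===== Notes on version B (the rewrite author's own statement) =====
-- stated objective: faster
-- what changed: Replaces the two-pointer pairing scan with shadow-list removals by a multiplicity check: build a count dictionary once and verify that every value appears exactly as often as its complement k-v (with an even count for the self-complementary value k/2), which holds iff the array splits entirely into pairs summing to k.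
import Mathlib
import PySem

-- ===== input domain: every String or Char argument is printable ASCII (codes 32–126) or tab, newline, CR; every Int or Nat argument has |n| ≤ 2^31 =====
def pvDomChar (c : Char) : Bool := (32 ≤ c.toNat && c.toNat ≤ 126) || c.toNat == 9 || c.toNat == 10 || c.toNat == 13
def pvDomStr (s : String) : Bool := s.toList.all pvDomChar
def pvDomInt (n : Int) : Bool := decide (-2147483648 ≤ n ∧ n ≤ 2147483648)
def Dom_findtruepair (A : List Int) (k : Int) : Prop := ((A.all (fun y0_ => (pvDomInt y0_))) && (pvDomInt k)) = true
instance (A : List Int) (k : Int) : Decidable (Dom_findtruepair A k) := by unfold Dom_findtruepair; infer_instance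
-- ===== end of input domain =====

-- B replaces A's two-pointer scan with list removals by a one-pass multiplicity
-- check over a count dictionary. Both Pythons sort A in place; the equivalence
-- proved here is about the RETURN value (B performs the same mutation).

-- ===== PORT A =====
-- while-loop of A, state (B, trai, phai); the .getD guards only make the
-- IndexError/ValueError cases total (proved unreachable below).
def findtruepairLoopA (k : Int) (S : List Int) : List Int → Int → Int → Nat → List Int
  | B, _, _, 0 => B
  | B, trai, phai, fuel+1 =>
    if trai < phai then
      match PySem.List.pyGet? S trai, PySem.List.pyGet? S phai with
      | some x, some y =>
        if x + y = k then
          let B1 := (PySem.List.remove? B x).getD B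
          let B2 := (PySem.List.remove? B1 y).getD B1
          findtruepairLoopA k S B2 (trai + 1) (phai - 1) fuel
        else if x + y < k then
          findtruepairLoopA k S B (trai + 1) phai fuel
        else
          findtruepairLoopA k S B trai (phai - 1) fuel
      | _, _ => B
    else B

def findtruepair (A : List Int) (k : Int) : Bool :=
  let S := PySem.List.sorted A (fun x => x) false
  let B := ([] : List Int) ++ S
  decide (findtruepairLoopA k S B 0 ((S.length : Int) - 1) S.length = [])

-- ===== PORT B =====
def findtruepair_alt (A : List Int) (k : Int) : Bool :=
  let S := PySem.List.sorted A (fun x => x) false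
  let cnt := S.foldl (fun d x => d.insert x (d.getD x 0 + 1)) PySem.Dict.empty
  cnt.items.all (fun vc =>
    if vc.1 + vc.1 = k then PySem.Int.mod vc.2 2 == 0
    else cnt.getD (k - vc.1) 0 == vc.2)

-- ===== PRECONDITION & SPEC =====
def Spec_findtruepair (A : List Int) (k : Int) (out : Bool) : Prop := out = findtruepair_alt A k
instance (A : List Int) (k : Int) (out : Bool) : Decidable (Spec_findtruepair A k out) := by unfold Spec_findtruepair; infer_instance

-- ===== CLAIM (what is proved, stated in full; the proofs are below) =====
def Claim_equal_findtruepair : Prop := ∀ (A : List Int) (k : Int), Dom_findtruepair A k → Spec_findtruepair A k (findtruepair A k)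

-- ===== LEMMAS AND PROOFS =====

-- Proof-side abstraction of A's scan: the number of removed elements, with the
-- same control flow as findtruepairLoopA.
def removedLoop (k : Int) (S : List Int) : Int → Int → Int → Nat → Int
  | removed, _, _, 0 => removed
  | removed, i, j, fuel+1 =>
    if i < j then
      match PySem.List.pyGet? S i, PySem.List.pyGet? S j with
      | some x, some y =>
        if x + y = k then
          removedLoop k S (removed + 2) (i + 1) (j - 1) fuel
        else if x + y < k then
          removedLoop k S removed (i + 1) j fuel
        else
          removedLoop k S removed i (j - 1) fuel
      | _, _ => removed
    else removed

-- Structural (list-ends) form of the two-pointer scan: number of elements removed.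
def twoPtr (k : Int) (l : List Int) : Nat :=
  match l with
  | [] => 0
  | [_] => 0
  | x :: y :: rest =>
      if x + (y :: rest).getLastD 0 = k then 2 + twoPtr k (y :: rest).dropLast
      else if x + (y :: rest).getLastD 0 < k then twoPtr k (y :: rest)
      else twoPtr k (x :: (y :: rest).dropLast)
termination_by l.length
decreasing_by all_goals simp [List.length_dropLast] <;> omega

-- The multiset condition B checks: every value occurs as often as its complement,
-- the self-complementary value an even number of times.
def PairCond (k : Int) (l : List Int) : Prop :=
  ∀ v : Int, if v + v = k then Even (l.count v) else l.count (k - v) = l.count v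

theorem twoPtr_cons_append (k x y : Int) (m : List Int) :
    twoPtr k (x :: m ++ [y])
      = if x + y = k then 2 + twoPtr k m
        else if x + y < k then twoPtr k (m ++ [y])
        else twoPtr k (x :: m) := by
  cases m with
  | nil => simp [twoPtr]
  | cons a m' =>
    have h1 : a :: (m' ++ [y]) = (a :: m') ++ [y] := rfl
    show twoPtr k (x :: a :: (m' ++ [y])) = _
    rw [twoPtr, h1, List.dropLast_concat, List.getLastD_concat]

theorem twoPtr_short (k : Int) (l : List Int) (h : l.length ≤ 1) : twoPtr k l = 0 := by
  match l with
  | [] => simp [twoPtr]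
  | [_] => simp [twoPtr]
  | _ :: _ :: _ => simp at h

theorem twoPtr_le (k : Int) : ∀ (l : List Int), twoPtr k l ≤ l.length := by
  intro l
  induction l using twoPtr.induct k
  all_goals rw [twoPtr]
  all_goals try simp
  all_goals split_ifs <;> simp_all [List.length_dropLast] <;> omega

-- Loop correspondence: the length of A's shadow list tracks S.length - removed,
-- under the invariant that the unscanned slice S[i..j] is a sub-multiset of B.
theorem findtruepair_loop_key (k : Int) (S : List Int) :
    ∀ (fuel : Nat) (B : List Int) (i j : Int) (r : Int),
      0 ≤ i → j < (S.length : Int) →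
      ((B.length : Int) = (S.length : Int) - r) →
      ((↑((S.drop i.toNat).take (j.toNat + 1 - i.toNat)) : Multiset Int) ≤ ↑B) →
      ((findtruepairLoopA k S B i j fuel).length : Int)
        = (S.length : Int) - removedLoop k S r i j fuel := by
  intro fuel
  induction fuel with
  | zero =>
    intro B i j r _ _ hlen _
    simpa [findtruepairLoopA, removedLoop] using hlen
  | succ fuel ih =>
    intro B i j r h0 hj hlen hsub
    by_cases hij : i < j
    · have h0j : 0 ≤ j := le_of_lt (lt_of_le_of_lt h0 hij)
      lift i to Nat using h0 with a
      lift j to Nat using h0j with b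
      have hab : a < b := by exact_mod_cast hij
      have hbS : b < S.length := by exact_mod_cast hj
      have haS : a < S.length := by omega
      simp only [Int.toNat_natCast] at hsub
      have hslice0 : (S.drop a).take (b + 1 - a)
          = S[a] :: (S.drop (a+1)).take (b - a) := by
        rw [List.drop_eq_getElem_cons haS, show b + 1 - a = (b - a) + 1 from by omega,
            List.take_succ_cons]
      have hsub0 : (↑(S[a] :: (S.drop (a+1)).take (b - a)) : Multiset Int) ≤ ↑B := by
        rw [← hslice0]; exact hsub
      simp only [findtruepairLoopA, removedLoop, if_pos hij,
        PySem.List.pyGet?_natCast, List.getElem?_eq_getElem haS,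
        List.getElem?_eq_getElem hbS]
      have ea : ((a : Int) + 1).toNat = a + 1 := by omega
      have eb : ((b : Int) - 1).toNat = b - 1 := by omega
      split_ifs with hk hlt
      · -- matched pair: both removes succeed
        have hsplit : (S.drop (a+1)).take (b - a)
            = (S.drop (a+1)).take (b - a - 1) ++ [S[b]] := by
          rw [show b - a = (b - a - 1) + 1 from by omega, List.take_add_one]
          have hgb : (S.drop (a+1))[b - a - 1]? = some S[b] := by
            rw [List.getElem?_drop, show a + 1 + (b - a - 1) = b from by omega,
                List.getElem?_eq_getElem hbS]
          rw [hgb]; rfl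
        rw [hsplit] at hsub0
        have hmemx : S[a] ∈ B := by
          refine Multiset.mem_of_le hsub0 ?_
          simp
        have hrem1 : PySem.List.remove? B S[a] = some (B.erase S[a]) :=
          PySem.List.remove?_eq_some_erase B S[a] hmemx
        have hsub1 : (↑((S.drop (a+1)).take (b - a - 1) ++ [S[b]]) : Multiset Int)
            ≤ ↑(B.erase S[a]) := by
          rw [← Multiset.coe_erase]
          have h := Multiset.erase_le_erase S[a] hsub0
          rwa [show ((↑(S[a] :: ((S.drop (a+1)).take (b - a - 1) ++ [S[b]])) : Multiset Int).erase S[a])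
              = ↑((S.drop (a+1)).take (b - a - 1) ++ [S[b]]) from by
                rw [← Multiset.cons_coe]; exact Multiset.erase_cons_head _ _] at h
        have hcoe : (↑((S.drop (a+1)).take (b - a - 1) ++ [S[b]]) : Multiset Int)
            = ↑(S[b] :: (S.drop (a+1)).take (b - a - 1)) :=
          Quot.sound (List.perm_append_singleton _ _)
        have hmemy : S[b] ∈ B.erase S[a] := by
          refine Multiset.mem_of_le hsub1 ?_
          simp
        have hrem2 : PySem.List.remove? (B.erase S[a]) S[b]
            = some ((B.erase S[a]).erase S[b]) :=
          PySem.List.remove?_eq_some_erase _ S[b] hmemy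
        have hsub2 : (↑((S.drop (a+1)).take (b - a - 1)) : Multiset Int)
            ≤ ↑((B.erase S[a]).erase S[b]) := by
          rw [← Multiset.coe_erase]
          have h := Multiset.erase_le_erase S[b] (le_of_eq_of_le hcoe.symm hsub1)
          rwa [show ((↑(S[b] :: (S.drop (a+1)).take (b - a - 1)) : Multiset Int).erase S[b])
              = ↑((S.drop (a+1)).take (b - a - 1)) from by
                rw [← Multiset.cons_coe]; exact Multiset.erase_cons_head _ _] at h
        have hl1 : (B.erase S[a]).length = B.length - 1 := List.length_erase_of_mem hmemx
        have hl2 : ((B.erase S[a]).erase S[b]).length = (B.erase S[a]).length - 1 :=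
          List.length_erase_of_mem hmemy
        have hp1 : 0 < B.length := List.length_pos_of_mem hmemx
        have hp2 : 0 < (B.erase S[a]).length := List.length_pos_of_mem hmemy
        simp only [hrem1, Option.getD_some, hrem2]
        refine ih _ _ _ _ (by omega) (by omega) (by omega) ?_
        rw [ea, eb, show b - 1 + 1 - (a + 1) = b - a - 1 from by omega]
        exact hsub2
      · refine ih _ _ _ _ (by omega) (by omega) hlen ?_
        rw [ea, Int.toNat_natCast, show b + 1 - (a + 1) = b - a from by omega]
        exact le_trans (Multiset.le_cons_self _ _) hsub0
      · refine ih _ _ _ _ (by omega) (by omega) hlen ?_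
        rw [eb, Int.toNat_natCast, show b - 1 + 1 - a = b - a from by omega]
        have h6 : List.Sublist ((S.drop a).take (b - a)) ((S.drop a).take (b + 1 - a)) := by
          rw [show (S.drop a).take (b - a) = ((S.drop a).take (b + 1 - a)).take (b - a) from by
            rw [List.take_take]; congr 1; omega]
          exact List.take_sublist _ _
        exact le_trans (Multiset.coe_le.mpr h6.subperm) hsub
    · simp only [findtruepairLoopA, removedLoop, if_neg hij]
      exact hlen

-- The indexed removal count equals the structural two-pointer count on the window.
theorem removedLoop_eq_twoPtr (k : Int) (S : List Int) :
    ∀ (fuel : Nat) (r i j : Int), 0 ≤ i → j < (S.length : Int) → j - i < (fuel : Int) →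
      removedLoop k S r i j fuel
        = r + (twoPtr k ((S.drop i.toNat).take (j.toNat + 1 - i.toNat)) : Int) := by
  intro fuel
  induction fuel with
  | zero =>
    intro r i j h0 _ hfu
    rw [twoPtr_short]
    · simp [removedLoop]
    · refine le_trans (List.length_take_le _ _) ?_
      omega
  | succ fuel ih =>
    intro r i j h0 hj hfu
    by_cases hij : i < j
    · have h0j : 0 ≤ j := le_of_lt (lt_of_le_of_lt h0 hij)
      lift i to Nat using h0 with a
      lift j to Nat using h0j with b
      have hab : a < b := by exact_mod_cast hij
      have hbS : b < S.length := by exact_mod_cast hj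
      have haS : a < S.length := by omega
      have hslice0 : (S.drop a).take (b + 1 - a)
          = S[a] :: (S.drop (a+1)).take (b - a) := by
        rw [List.drop_eq_getElem_cons haS, show b + 1 - a = (b - a) + 1 from by omega,
            List.take_succ_cons]
      have hsplit : (S.drop (a+1)).take (b - a)
          = (S.drop (a+1)).take (b - a - 1) ++ [S[b]] := by
        rw [show b - a = (b - a - 1) + 1 from by omega, List.take_add_one]
        have hgb : (S.drop (a+1))[b - a - 1]? = some S[b] := by
          rw [List.getElem?_drop, show a + 1 + (b - a - 1) = b from by omega,
              List.getElem?_eq_getElem hbS]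
        rw [hgb]; rfl
      have ea : ((a : Int) + 1).toNat = a + 1 := by omega
      have eb : ((b : Int) - 1).toNat = b - 1 := by omega
      simp only [removedLoop, if_pos hij, PySem.List.pyGet?_natCast,
        List.getElem?_eq_getElem haS, List.getElem?_eq_getElem hbS,
        Int.toNat_natCast]
      rw [hslice0, hsplit, ← List.cons_append, twoPtr_cons_append]
      split_ifs with hk hlt
      · rw [ih (r + 2) _ _ (by omega) (by omega) (by push_cast at hfu ⊢; omega)]
        rw [ea, eb, show b - 1 + 1 - (a + 1) = b - a - 1 from by omega]
        push_cast; ring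
      · rw [ih r _ _ (by omega) (by omega) (by push_cast at hfu ⊢; omega)]
        rw [ea, Int.toNat_natCast, show b + 1 - (a + 1) = b - a from by omega, hsplit]
      · rw [ih r _ _ (by omega) (by omega) (by push_cast at hfu ⊢; omega)]
        rw [eb, Int.toNat_natCast, show b - 1 + 1 - a = b - a from by omega]
        rw [show (S.drop a).take (b - a)
              = S[a] :: (S.drop (a+1)).take (b - a - 1) from by
          rw [List.drop_eq_getElem_cons haS, show b - a = (b - a - 1) + 1 from by omega,
              List.take_succ_cons]
          simp]
    · have hwin : ((S.drop i.toNat).take (j.toNat + 1 - i.toNat)).length ≤ 1 := by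
        refine le_trans (List.length_take_le _ _) ?_
        omega
      rw [twoPtr_short _ _ hwin]
      simp [removedLoop, hij]

-- For a sorted list, the two-pointer scan removes everything iff PairCond holds.
theorem twoPtr_len_iff (k : Int) :
    ∀ (n : Nat) (l : List Int), l.length ≤ n → l.Pairwise (· ≤ ·) →
      (twoPtr k l = l.length ↔ PairCond k l) := by
  intro n
  induction n with
  | zero =>
    intro l hn _
    have : l = [] := List.eq_nil_of_length_eq_zero (by omega)
    subst this
    simp only [twoPtr, List.length_nil, true_iff]
    intro v
    split_ifs <;> simp
  | succ n ih =>
    intro l hn hsort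
    match l with
    | [] =>
      simp only [twoPtr, List.length_nil, true_iff]
      intro v; split_ifs <;> simp
    | [x] =>
      simp only [twoPtr, List.length_cons, List.length_nil]
      constructor
      · omega
      · intro hpc
        exfalso
        have h := hpc x
        by_cases hx : x + x = k
        · rw [if_pos hx] at h
          simp [List.count_cons, Nat.even_iff] at h
        · rw [if_neg hx] at h
          have hne : x ≠ k - x := by omega
          simp [List.count_cons, hne] at h
    | x :: y :: rest =>
      -- write the list as x :: m ++ [z]
      obtain ⟨m, z, hmz⟩ : ∃ m z, y :: rest = m ++ [z] := by
        refine ⟨(y :: rest).dropLast, (y :: rest).getLast (by simp), ?_⟩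
        exact (List.dropLast_append_getLast (by simp)).symm
      rw [hmz] at hsort hn ⊢
      rw [← List.cons_append, twoPtr_cons_append]
      have hxle : ∀ e ∈ m ++ [z], x ≤ e := (List.pairwise_cons.mp hsort).1
      have hsort' : (x :: m ++ [z]).Pairwise (· ≤ ·) := by rw [List.cons_append]; exact hsort
      have hlez : ∀ e ∈ x :: m, e ≤ z := by
        have := (List.pairwise_append.mp hsort').2.2
        intro e he; exact this e he z (by simp)
      have hxz : x ≤ z := hxle z (by simp)
      have hmem_le : ∀ e ∈ x :: m ++ [z], e ≤ z := by
        intro e he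
        rw [List.cons_append, List.mem_cons, List.mem_append] at he
        rcases he with h | h | h
        · exact hlez e (by simp [h])
        · exact hlez e (by simp [h])
        · simp at h; omega
      have hmem_ge : ∀ e ∈ x :: m ++ [z], x ≤ e := by
        intro e he
        rw [List.cons_append, List.mem_cons] at he
        rcases he with h | h
        · omega
        · exact hxle e h
      have hsm : m.Pairwise (· ≤ ·) :=
        ((List.pairwise_append.mp (List.pairwise_cons.mp hsort').2).1)
      have hlen : (x :: m ++ [z]).length = m.length + 2 := by simp
      split_ifs with hk hlt
      · -- matched ends: reduces to m
        have hml : m.length ≤ n := by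
          simp only [List.length_cons, List.length_append, List.length_cons,
            List.length_nil] at hn
          omega
        have ihm := ih m hml hsm
        have hcount : ∀ v : Int, (x :: m ++ [z]).count v
            = m.count v + (if x = v then 1 else 0) + (if z = v then 1 else 0) := by
          intro v
          simp [List.count_cons, List.count_append]
          omega
        have hcond : PairCond k (x :: m ++ [z]) ↔ PairCond k m := by
          constructor
          · intro h v
            have hv := h v
            by_cases hvv : v + v = k
            · simp only [if_pos hvv] at hv ⊢
              by_cases hxv : x = v
              · have hzv : z = v := by omega
                rw [hcount, if_pos hxv, if_pos hzv] at hv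
                rcases hv with ⟨c, hc⟩
                exact ⟨c - 1, by omega⟩
              · have hzv : z ≠ v := by
                  intro hzv; exact hxv (by omega)
                rwa [hcount, if_neg hxv, if_neg hzv, Nat.add_zero] at hv
            · simp only [if_neg hvv] at hv ⊢
              by_cases hxv : x = v
              · -- v = x, k - v = z, x ≠ z
                have hxz' : x ≠ z := by omega
                have hkz : k - v = z := by omega
                rw [hcount, hcount, hkz] at hv
                have hzz : z ≠ v := by omega
                rw [if_pos rfl, if_neg (by omega : x ≠ z), if_pos hxv, if_neg hzz] at hv
                rw [hkz]
                omega
              · by_cases hzv : z = v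
                · have hxz' : x ≠ z := by omega
                  have hkx : k - v = x := by omega
                  rw [hcount, hcount, hkx] at hv
                  rw [if_pos rfl, if_neg (by omega : z ≠ x), if_neg hxv, if_pos hzv] at hv
                  rw [hkx]
                  omega
                · have h1 : x ≠ k - v := by intro h; exact hzv (by omega)
                  have h2 : z ≠ k - v := by intro h; exact hxv (by omega)
                  rw [hcount, hcount, if_neg hxv, if_neg hzv, if_neg h1, if_neg h2] at hv
                  simpa using hv
          · intro h v
            have hv := h v
            by_cases hvv : v + v = k
            · simp only [if_pos hvv] at hv ⊢
              by_cases hxv : x = v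
              · have hzv : z = v := by omega
                rw [hcount, if_pos hxv, if_pos hzv]
                rcases hv with ⟨c, hc⟩
                exact ⟨c + 1, by omega⟩
              · have hzv : z ≠ v := fun hzv => hxv (by omega)
                rwa [hcount, if_neg hxv, if_neg hzv, Nat.add_zero]
            · simp only [if_neg hvv] at hv ⊢
              by_cases hxv : x = v
              · have hkz : k - v = z := by omega
                have hzz : z ≠ v := by omega
                rw [hcount, hcount, hkz, if_pos rfl, if_neg (by omega : x ≠ z),
                  if_pos hxv, if_neg hzz]
                have := h v
                rw [if_neg hvv, hkz] at this
                omega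
              · by_cases hzv : z = v
                · have hkx : k - v = x := by omega
                  rw [hcount, hcount, hkx, if_pos rfl, if_neg (by omega : z ≠ x),
                    if_neg hxv, if_pos hzv]
                  rw [hkx] at hv
                  omega
                · have h1 : x ≠ k - v := fun h' => hzv (by omega)
                  have h2 : z ≠ k - v := fun h' => hxv (by omega)
                  rw [hcount, hcount, if_neg hxv, if_neg hzv, if_neg h1, if_neg h2]
                  simpa using hv
        rw [hlen, hcond, ← ihm]
        omega
      · -- x + z < k: x unmatchable, both sides false
        have htp : twoPtr k (m ++ [z]) ≤ m.length + 1 := by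
          have := twoPtr_le k (m ++ [z])
          simpa using this
        constructor
        · intro h; rw [hlen] at h; omega
        · intro hpc
          exfalso
          have hv := hpc x
          have hxx : x + x ≠ k := by omega
          rw [if_neg hxx] at hv
          have hnot : k - x ∉ x :: m ++ [z] := by
            intro hmem
            have := hmem_le _ hmem
            omega
          rw [List.count_eq_zero.mpr hnot] at hv
          have : x ∈ x :: m ++ [z] := by simp
          have := List.count_pos_iff.mpr this
          omega
      · -- x + z > k: z unmatchable, both sides false
        have htp : twoPtr k (x :: m) ≤ m.length + 1 := by
          have := twoPtr_le k (x :: m)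
          simpa using this
        constructor
        · intro h; rw [hlen] at h; omega
        · intro hpc
          exfalso
          have hv := hpc z
          have hzz : z + z ≠ k := by omega
          rw [if_neg hzz] at hv
          have hnot : k - z ∉ x :: m ++ [z] := by
            intro hmem
            have := hmem_ge _ hmem
            omega
          rw [List.count_eq_zero.mpr hnot] at hv
          have : z ∈ x :: m ++ [z] := by simp
          have := List.count_pos_iff.mpr this
          omega

-- B's dict check computes PairCond.
theorem counter_all_iff (k : Int) (S : List Int) :
    ((PySem.Dict.counter S).items.all (fun vc =>
      if vc.1 + vc.1 = k then PySem.Int.mod vc.2 2 == 0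
      else (PySem.Dict.counter S).getD (k - vc.1) 0 == vc.2)) = true ↔ PairCond k S := by
  rw [List.all_eq_true]
  constructor
  · intro h v
    by_cases hv : v ∈ S
    · have hmem : (v, (S.count v : Int)) ∈ (PySem.Dict.counter S).items := by
        rw [PySem.Dict.items_counter]
        exact List.mem_map_of_mem ((PySem.Set.mem_ofList _ _).mpr hv)
      have h1 := h _ hmem
      simp only [PySem.Dict.getD_counter] at h1
      by_cases hvv : v + v = k
      · rw [if_pos hvv] at h1
        rw [if_pos hvv]
        have h2 : PySem.Int.mod ((S.count v : Int)) 2 = 0 := beq_iff_eq.mp h1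
        have h3 : (2 : Int) ∣ (S.count v : Int) := (PySem.Int.mod_eq_zero_iff_dvd _ _).mp h2
        have h4 : 2 ∣ S.count v := by exact_mod_cast h3
        exact even_iff_two_dvd.mpr h4
      · rw [if_neg hvv] at h1
        rw [if_neg hvv]
        exact_mod_cast beq_iff_eq.mp h1
    · by_cases hvv : v + v = k
      · rw [if_pos hvv, List.count_eq_zero.mpr hv]
        exact ⟨0, rfl⟩
      · rw [if_neg hvv, List.count_eq_zero.mpr hv]
        by_cases hkv : k - v ∈ S
        · have hmem : (k - v, (S.count (k - v) : Int)) ∈ (PySem.Dict.counter S).items := by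
            rw [PySem.Dict.items_counter]
            exact List.mem_map_of_mem ((PySem.Set.mem_ofList _ _).mpr hkv)
          have h1 := h _ hmem
          have hne : ¬ ((k - v) + (k - v) = k) := by omega
          simp only [if_neg hne, PySem.Dict.getD_counter,
            show k - (k - v) = v from by omega] at h1
          have h2 := beq_iff_eq.mp h1
          rw [List.count_eq_zero.mpr hv] at h2
          exact_mod_cast h2.symm
        · rw [List.count_eq_zero.mpr hkv]
  · intro h vc hmem
    rw [PySem.Dict.items_counter] at hmem
    rcases List.mem_map.mp hmem with ⟨v, hv, rfl⟩
    have hv' := h v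
    simp only [PySem.Dict.getD_counter]
    by_cases hvv : v + v = k
    · rw [if_pos hvv] at hv'
      rw [if_pos hvv]
      rcases hv' with ⟨c, hc⟩
      exact beq_iff_eq.mpr ((PySem.Int.mod_eq_zero_iff_dvd _ _).mpr ⟨c, by push_cast [hc]; ring⟩)
    · rw [if_neg hvv] at hv'
      rw [if_neg hvv]
      exact beq_iff_eq.mpr (by exact_mod_cast hv')

theorem alt_iff_paircond (A : List Int) (k : Int) :
    findtruepair_alt A k = true ↔ PairCond k (PySem.List.sorted A (fun x => x) false) :=
  counter_all_iff k (PySem.List.sorted A (fun x => x) false)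

-- ===== VERDICT (by name: the statement is the Claim_ definition above) =====
theorem findtruepair_spec : Claim_equal_findtruepair := by
  intro A k _
  unfold Spec_findtruepair
  unfold findtruepair
  simp only [List.nil_append]
  set S := PySem.List.sorted A (fun x => x) false with hS
  have hkey := findtruepair_loop_key k S S.length S 0
      ((S.length : Int) - 1) 0 (by omega) (by omega) (by simp)
      (by
        simp only [Int.toNat_zero, List.drop_zero, Nat.sub_zero]
        exact Multiset.coe_le.mpr (List.take_sublist _ _).subperm)
  have htw := removedLoop_eq_twoPtr k S S.length 0 0 ((S.length : Int) - 1)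
      (by omega) (by omega) (by omega)
  have hwin : (S.drop (0 : Int).toNat).take (((S.length : Int) - 1).toNat + 1 - (0 : Int).toNat) = S := by
    cases S with
    | nil => simp
    | cons s t =>
      simp only [Int.toNat_zero, List.drop_zero, Nat.sub_zero]
      rw [show (((s :: t).length : Int) - 1).toNat + 1 = (s :: t).length from by
        simp]
      exact List.take_length ..
  rw [hwin] at htw
  rw [htw] at hkey
  have hle := twoPtr_le k S
  have hsorted : S.Pairwise (· ≤ ·) := PySem.List.sorted_pairwise A (fun x => x) 
  have hiff := twoPtr_len_iff k S.length S (le_refl _) hsorted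
  have halt := alt_iff_paircond A k
  rw [← hS] at halt
  rcases hb : findtruepair_alt A k with _ | _
  · -- alt = false: PairCond fails, so twoPtr < length, loopA nonempty
    simp only [decide_eq_false_iff_not]
    intro hempty
    rw [hempty] at hkey
    simp only [List.length_nil, Nat.cast_zero] at hkey
    have : twoPtr k S = S.length := by omega
    have := hiff.mp this
    rw [← halt] at this
    simp [hb] at this
  · simp only [decide_eq_true_eq]
    have hpc : PairCond k S := halt.mp hb
    have : twoPtr k S = S.length := hiff.mpr hpc
    rw [this] at hkey
    have h0 : (findtruepairLoopA k S S 0 ((S.length : Int) - 1) S.length).length = 0 := by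
      omega
    exact List.eq_nil_of_length_eq_zero h0
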